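-- pv_equiv track=rewrite | github.com/Telles0203/botbynight | commands/channel_invite_command.py | build_scene_topic_from_dict
-- ===== SOURCE A (Python) =====
-- def build_scene_topic_from_dict(data: dict[str, str]) -> str:
--     ordered_keys = [
--         "scene_owner",
--         "scene_type",
--         "status",
--         "description",
--         "guests",
--         "invited_member",
--     ]
--
--     parts: list[str] = []
--
--     for key in ordered_keys:
--         value = data.get(key)
--         if value is not None and str(value).strip():
--             parts.append(f"{key}={value}")
--
--     for key, value in data.items():
--         if key in ordered_keys:
--             continue
--         if value is None or not str(value).strip():
--             continue
--         parts.append(f"{key}={value}")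
--
--     return ";".join(parts)
-- ===== SOURCE B (Python) =====
-- def build_scene_topic_from_dict(data: dict[str, str]) -> str:
--     ordered_keys = [
--         "scene_owner",
--         "scene_type",
--         "status",
--         "description",
--         "guests",
--         "invited_member",
--     ]
--     n = len(ordered_keys)
--     rank = {key: i for i, key in enumerate(ordered_keys)}
--
--     buckets: list[list[tuple[str, str]]] = [[] for _ in range(n + 1)]
--     for key, value in data.items():
--         buckets[rank.get(key, n)].append((key, value))
--
--     parts = [
--         f"{key}={value}"
--         for bucket in buckets
--         for key, value in bucket
--         if value is not None and str(value).strip()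
--     ]
--     return ";".join(parts)
-- ===== Notes on version B (the rewrite author's own statement) =====
-- stated objective: alternative
-- what changed: Replaces A's two ordered scans (one probing the dict per prioritized key, one re-scanning all items) with a rank table and a single bucket-distribution pass over the items, then one filtering/formatting pass over the concatenated buckets.
import Mathlib
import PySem

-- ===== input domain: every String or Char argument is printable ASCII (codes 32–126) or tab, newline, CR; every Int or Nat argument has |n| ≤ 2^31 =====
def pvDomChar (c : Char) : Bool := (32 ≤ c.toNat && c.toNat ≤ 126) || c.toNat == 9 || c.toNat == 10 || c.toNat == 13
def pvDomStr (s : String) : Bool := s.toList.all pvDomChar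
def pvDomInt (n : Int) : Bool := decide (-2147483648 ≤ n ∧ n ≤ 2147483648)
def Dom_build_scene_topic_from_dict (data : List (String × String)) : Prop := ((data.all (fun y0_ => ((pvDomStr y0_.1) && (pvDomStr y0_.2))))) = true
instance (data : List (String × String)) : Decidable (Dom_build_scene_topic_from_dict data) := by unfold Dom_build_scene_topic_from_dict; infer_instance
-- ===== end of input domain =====

-- ===== PORT A =====
-- B reorganizes the traversal (rank table + one bucket-distribution pass) instead of A's two ordered scans; same output, similar cost.
def build_scene_topic_from_dict (data : List (String × String)) : String :=
  let d := PySem.Dict.ofList data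
  let ordered_keys : List String :=
    ["scene_owner", "scene_type", "status", "description", "guests", "invited_member"]
  let parts : List String :=
    ordered_keys.foldl (fun parts key =>
      match d.get? key with
      | some value => if PySem.Str.strip value ≠ "" then parts ++ [key ++ "=" ++ value] else parts
      | none => parts) []
  let parts :=
    d.items.foldl (fun parts kv =>
      if ordered_keys.contains kv.1 then parts
      else if PySem.Str.strip kv.2 = "" then parts
      else parts ++ [kv.1 ++ "=" ++ kv.2]) parts
  PySem.Str.join ";" parts

-- ===== PORT B =====
def build_scene_topic_from_dict_alt (data : List (String × String)) : String :=
  let d := PySem.Dict.ofList data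
  let ordered_keys : List String :=
    ["scene_owner", "scene_type", "status", "description", "guests", "invited_member"]
  let n : Int := ordered_keys.length
  let rank : PySem.Dict String Int :=
    PySem.Dict.ofList ((PySem.List.enumerate ordered_keys).map (fun p => (p.2, p.1)))
  let buckets : List (List (String × String)) := List.replicate (ordered_keys.length + 1) []
  let buckets :=
    d.items.foldl (fun bs kv =>
      let r : Int := rank.getD kv.1 n
      PySem.List.pySetD bs r (PySem.List.pyGetD bs r [] ++ [kv])) buckets
  let parts : List String :=
    buckets.flatMap (fun bucket =>
      bucket.filterMap (fun kv =>
        if PySem.Str.strip kv.2 ≠ "" then some (kv.1 ++ "=" ++ kv.2) else none))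
  PySem.Str.join ";" parts

-- ===== PRECONDITION & SPEC =====
def Spec_build_scene_topic_from_dict (data : List (String × String)) (out : String) : Prop := out = build_scene_topic_from_dict_alt data
instance (data : List (String × String)) (out : String) : Decidable (Spec_build_scene_topic_from_dict data out) := by unfold Spec_build_scene_topic_from_dict; infer_instance

-- ===== CLAIM (what is proved, stated in full; the proofs are below) =====
def Claim_equal_build_scene_topic_from_dict : Prop := ∀ (data : List (String × String)), Dom_build_scene_topic_from_dict data → Spec_build_scene_topic_from_dict data (build_scene_topic_from_dict data)

-- ===== LEMMAS AND PROOFS =====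

def pvOK : List String :=
  ["scene_owner", "scene_type", "status", "description", "guests", "invited_member"]

def pvRk (k : String) : Nat :=
  if k = "scene_owner" then 0 else if k = "scene_type" then 1 else if k = "status" then 2
  else if k = "description" then 3 else if k = "guests" then 4 else if k = "invited_member" then 5 else 6

def pvFmt (kv : String × String) : Option String :=
  if PySem.Str.strip kv.2 ≠ "" then some (kv.1 ++ "=" ++ kv.2) else none

def pvRank : PySem.Dict String Int :=
  PySem.Dict.ofList ((PySem.List.enumerate pvOK).map (fun p => (p.2, p.1)))

theorem pvRank_eq : pvRank = ⟨[("scene_owner",0),("scene_type",1),("status",2),("description",3),("guests",4),("invited_member",5)]⟩ := by decide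

theorem rank_getD (k : String) : pvRank.getD k 6 = (pvRk k : Int) := by
  rw [pvRank_eq]
  simp only [PySem.Dict.getD_eq_get?_getD, PySem.Dict.get?_mk_cons, pvRk]
  have h : ∀ (a : String), (a == k) = decide (k = a) := by
    intro a; by_cases e : a = k
    · subst e; simp
    · rw [beq_eq_false_iff_ne.2 e, decide_eq_false (fun h => e h.symm)]
  simp only [h]
  split_ifs <;> simp_all [PySem.Dict.get?]

-- one step of the bucket distribution
theorem bucket_fold (l : List (String × String)) :
    l.foldl (fun bs kv =>
        PySem.List.pySetD bs (pvRank.getD kv.1 6) (PySem.List.pyGetD bs (pvRank.getD kv.1 6) [] ++ [kv]))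
      (List.replicate 7 []) =
    (List.range 7).map (fun i => l.filter (fun p => pvRk p.1 == i)) := by
  induction l using List.reverseRecOn with
  | nil => simp
  | append_singleton l p ih =>
      rw [List.foldl_append, List.foldl_cons, List.foldl_nil, ih]
      have hr : pvRank.getD p.1 6 = ((pvRk p.1 : Nat) : Int) := rank_getD p.1
      have hlt : pvRk p.1 < 7 := by unfold pvRk; split_ifs <;> omega
      rw [hr, PySem.List.pyGetD_natCast]
      have hlen : ((List.range 7).map (fun i => l.filter (fun p => pvRk p.1 == i))).length = 7 := by simp
      have hset : PySem.List.pySetD ((List.range 7).map (fun i => l.filter (fun p => pvRk p.1 == i))) ((pvRk p.1 : Nat) : Int)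
          ((((List.range 7).map (fun i => l.filter (fun p => pvRk p.1 == i))).getD (pvRk p.1) []) ++ [p]) =
          ((List.range 7).map (fun i => l.filter (fun p => pvRk p.1 == i))).set (pvRk p.1)
          ((((List.range 7).map (fun i => l.filter (fun p => pvRk p.1 == i))).getD (pvRk p.1) []) ++ [p]) := by
        simp [PySem.List.pySetD, PySem.List.pySet?, PySem.List.pyIdx?, hlen, hlt]
      rw [hset]
      apply List.ext_getElem
      · simp
      · intro i h1 h2
        simp only [List.length_set, hlen] at h1
        have hi : i < 7 := by simpa using h2
        by_cases e : i = pvRk p.1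
        · subst e
          simp [List.getD_eq_getElem?_getD, List.filter_append, hlt]
        · simp [List.getElem_set, List.filter_append]
          have h3 : (pvRk p.1 == i) = false := by simp [Ne.symm e]
          simp [h3]
          exact fun h => absurd h.symm e

theorem filter_key_singleton {l : List (String × String)} (hnd : (l.map Prod.fst).Nodup)
    {k : String} {v : String} (h : (k, v) ∈ l) :
    l.filter (fun p => p.1 == k) = [(k, v)] := by
  induction l with
  | nil => cases h
  | cons q l ih =>
      simp only [List.map_cons, List.nodup_cons] at hnd
      rcases List.mem_cons.1 h with h | h
      · subst h
        simp only [List.filter_cons, beq_self_eq_true, if_pos]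
        simp only [List.cons.injEq, true_and]
        apply List.filter_eq_nil_iff.2
        intro p hp hbeq
        have hpk : p.1 = k := by simpa using hbeq
        exact absurd (List.mem_map.2 ⟨p, hp, hpk⟩) hnd.1
      · have hne : q.1 ≠ k := by
          intro e
          exact hnd.1 (e ▸ (by simpa using List.mem_map_of_mem (f := Prod.fst) h))
        simp only [List.filter_cons]
        rw [if_neg (by simp [hne])]
        exact ih hnd.2 h

theorem filterMap_pvFmt (xs : List (String × String)) :
    xs.filterMap pvFmt =
      (xs.filter (fun p => !(PySem.Str.strip p.2 == ""))).map (fun p => p.1 ++ "=" ++ p.2) := by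
  induction xs with
  | nil => rfl
  | cons p xs ih =>
      simp only [pvFmt, ite_not] at ih ⊢
      by_cases h : PySem.Str.strip p.2 = "" <;> simp [h, ih]

theorem A_loop1 (d : PySem.Dict String String) (hnd : d.keys.Nodup) :
    pvOK.foldl (fun parts key =>
        match d.get? key with
        | some value => if PySem.Str.strip value ≠ "" then parts ++ [key ++ "=" ++ value] else parts
        | none => parts) [] =
      pvOK.flatMap (fun k => (d.items.filter (fun p => p.1 == k)).filterMap pvFmt) := by
  have hstep : (fun (parts : List String) (key : String) =>
        match d.get? key with
        | some value => if PySem.Str.strip value ≠ "" then parts ++ [key ++ "=" ++ value] else parts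
        | none => parts) =
      (fun parts key => parts ++ (d.items.filter (fun p => p.1 == key)).filterMap pvFmt) := by
    funext parts key
    cases hg : d.get? key with
    | none =>
        have hnk := (PySem.Dict.get?_eq_none_iff_not_mem_keys d key).1 hg
        have hf : d.items.filter (fun p => p.1 == key) = [] := by
          apply List.filter_eq_nil_iff.2
          intro p hp hb
          have hpk : p.1 = key := by simpa using hb
          exact hnk (List.mem_map.2 ⟨p, hp, hpk⟩)
        simp [hf]
    | some v =>
        have hm := PySem.Dict.mem_items_of_get?_eq_some d hg
        have hnd' : (d.items.map Prod.fst).Nodup := hnd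
        have hf := filter_key_singleton hnd' hm
        by_cases hs : PySem.Str.strip v = "" <;> simp [hf, pvFmt, hs]
  rw [hstep, PySem.List.foldl_append_eq_flatMap]
  simp

theorem A_loop2 (l : List (String × String)) (p0 : List String) :
    l.foldl (fun parts kv =>
        if pvOK.contains kv.1 then parts
        else if PySem.Str.strip kv.2 = "" then parts
        else parts ++ [kv.1 ++ "=" ++ kv.2]) p0 =
      p0 ++ (l.filter (fun p => !pvOK.contains p.1 && !(PySem.Str.strip p.2 == ""))).map
        (fun p => p.1 ++ "=" ++ p.2) := by
  have hstep : (fun (parts : List String) (kv : String × String) =>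
        if pvOK.contains kv.1 then parts
        else if PySem.Str.strip kv.2 = "" then parts
        else parts ++ [kv.1 ++ "=" ++ kv.2]) =
      (fun parts kv =>
        if (!pvOK.contains kv.1 && !(PySem.Str.strip kv.2 == "")) then parts ++ [kv.1 ++ "=" ++ kv.2]
        else parts) := by
    funext parts kv
    by_cases h1 : pvOK.contains kv.1 <;> by_cases h2 : PySem.Str.strip kv.2 = "" <;> simp [h2]
  rw [hstep, PySem.List.foldl_append_if]

theorem rk_eq0 (k : String) : (pvRk k == (0:Nat)) = (k == "scene_owner") := by
  unfold pvRk; split_ifs <;> simp_all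
theorem rk_eq1 (k : String) : (pvRk k == (1:Nat)) = (k == "scene_type") := by
  unfold pvRk; split_ifs <;> simp_all
theorem rk_eq2 (k : String) : (pvRk k == (2:Nat)) = (k == "status") := by
  unfold pvRk; split_ifs <;> simp_all
theorem rk_eq3 (k : String) : (pvRk k == (3:Nat)) = (k == "description") := by
  unfold pvRk; split_ifs <;> simp_all
theorem rk_eq4 (k : String) : (pvRk k == (4:Nat)) = (k == "guests") := by
  unfold pvRk; split_ifs <;> simp_all
theorem rk_eq5 (k : String) : (pvRk k == (5:Nat)) = (k == "invited_member") := by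
  unfold pvRk; split_ifs <;> simp_all
theorem rk_eq6 (k : String) : (pvRk k == (6:Nat)) = !pvOK.contains k := by
  unfold pvRk pvOK; split_ifs <;> simp_all

set_option maxHeartbeats 2000000 in
theorem parts_eq (d : PySem.Dict String String) (hnd : d.keys.Nodup) :
    d.items.foldl (fun parts kv =>
        if pvOK.contains kv.1 then parts
        else if PySem.Str.strip kv.2 = "" then parts
        else parts ++ [kv.1 ++ "=" ++ kv.2])
      (pvOK.foldl (fun parts key =>
        match d.get? key with
        | some value => if PySem.Str.strip value ≠ "" then parts ++ [key ++ "=" ++ value] else parts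
        | none => parts) []) =
    (d.items.foldl (fun bs kv =>
        PySem.List.pySetD bs (pvRank.getD kv.1 6) (PySem.List.pyGetD bs (pvRank.getD kv.1 6) [] ++ [kv]))
      (List.replicate 7 [])).flatMap (fun b => b.filterMap pvFmt) := by
  rw [A_loop2, A_loop1 d hnd, bucket_fold]
  have hrange : List.range 7 = [0,1,2,3,4,5,6] := rfl
  rw [hrange]
  have e0 : d.items.filter (fun p => pvRk p.1 == (0:Nat)) = d.items.filter (fun p => p.1 == "scene_owner") :=
    List.filter_congr (fun p _ => rk_eq0 p.1)
  have e1 : d.items.filter (fun p => pvRk p.1 == (1:Nat)) = d.items.filter (fun p => p.1 == "scene_type") :=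
    List.filter_congr (fun p _ => rk_eq1 p.1)
  have e2 : d.items.filter (fun p => pvRk p.1 == (2:Nat)) = d.items.filter (fun p => p.1 == "status") :=
    List.filter_congr (fun p _ => rk_eq2 p.1)
  have e3 : d.items.filter (fun p => pvRk p.1 == (3:Nat)) = d.items.filter (fun p => p.1 == "description") :=
    List.filter_congr (fun p _ => rk_eq3 p.1)
  have e4 : d.items.filter (fun p => pvRk p.1 == (4:Nat)) = d.items.filter (fun p => p.1 == "guests") :=
    List.filter_congr (fun p _ => rk_eq4 p.1)
  have e5 : d.items.filter (fun p => pvRk p.1 == (5:Nat)) = d.items.filter (fun p => p.1 == "invited_member") :=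
    List.filter_congr (fun p _ => rk_eq5 p.1)
  have e6 : (d.items.filter (fun p => pvRk p.1 == (6:Nat))).filterMap pvFmt =
      (d.items.filter (fun p => !pvOK.contains p.1 && !(PySem.Str.strip p.2 == ""))).map
        (fun p => p.1 ++ "=" ++ p.2) := by
    rw [filterMap_pvFmt, List.filter_filter]
    congr 1
    exact List.filter_congr (fun p _ => by rw [rk_eq6]; exact Bool.and_comm _ _)
  simp only [List.map_cons, List.map_nil, List.flatMap_cons, List.flatMap_nil, List.append_nil,
    e0, e1, e2, e3, e4, e5, e6, pvOK]
  simp [List.append_assoc]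

-- ===== VERDICT (by name: the statement is the Claim_ definition above) =====
theorem build_scene_topic_from_dict_spec : Claim_equal_build_scene_topic_from_dict := by
  intro data _
  show build_scene_topic_from_dict data = build_scene_topic_from_dict_alt data
  exact congrArg (PySem.Str.join ";")
    (parts_eq (PySem.Dict.ofList data) (PySem.Dict.nodup_keys_ofList data))
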